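-- pv_equiv track=rewrite | github.com/glockpete/Forecastin | scripts/golden_source_updater.py | update_changelog
-- ===== SOURCE A (Python) =====
-- CHANGELOG_HEADER = "## 7. Changelog"
--
-- def find_section_indices(content_lines, header_text):
--     """Finds the start index of a header and the start index of the next major section."""
--     start_index = -1
--     end_index = len(content_lines)
--
--     for i, line in enumerate(content_lines):
--         stripped_line = line.strip()
--         if stripped_line.startswith(header_text):
--             start_index = i
--         elif start_index != -1 and (stripped_line.startswith('## ') or stripped_line.startswith('---')):
--             end_index = i
--             break
--
--     return start_index, end_index
--
-- def update_changelog(content_lines, log_id, mode, task_title, outcome_emoji, timestamp_str):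
--     """Updates the Changelog section."""
--     new_entry = f"- **{log_id}** ({timestamp_str}): {mode} - {task_title} {outcome_emoji}\n"
--
--     start_index, end_index = find_section_indices(content_lines, CHANGELOG_HEADER)
--
--     if start_index == -1:
--         return None, "Error: Changelog header not found."
--
--     # Find insertion point: after the header, before the first list item or end of section
--     insert_line = start_index + 1
--     while insert_line < end_index and content_lines[insert_line].strip().startswith('-'):
--         insert_line += 1
--
--     # Check for duplicates before inserting
--     for i in range(start_index + 1, end_index):
--         if log_id in content_lines[i]:
--             return content_lines, f"Warning: Changelog entry for ID {log_id} already exists. Skipping insertion."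
--
--     content_lines.insert(insert_line, new_entry)
--
--     return content_lines, None
-- ===== SOURCE B (Python) =====
-- CHANGELOG_HEADER = "## 7. Changelog"
--
-- def update_changelog(content_lines, log_id, mode, task_title, outcome_emoji, timestamp_str):
--     """Single pass: track section start, insert position and duplicate flag while walking once."""
--     new_entry = f"- **{log_id}** ({timestamp_str}): {mode} - {task_title} {outcome_emoji}\n"
--     in_section = False
--     insert_at = None
--     scanning = False
--     duplicate = False
--     for i, line in enumerate(content_lines):
--         s = line.strip()
--         if s.startswith(CHANGELOG_HEADER):
--             in_section = True
--             insert_at = i + 1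
--             scanning = True
--             duplicate = False
--         elif in_section:
--             if s.startswith('## ') or s.startswith('---'):
--                 break
--             if scanning and s.startswith('-'):
--                 insert_at = i + 1
--             else:
--                 scanning = False
--             if log_id in line:
--                 duplicate = True
--     if insert_at is None:
--         return None, "Error: Changelog header not found."
--     if duplicate:
--         return content_lines, f"Warning: Changelog entry for ID {log_id} already exists. Skipping insertion."
--     content_lines.insert(insert_at, new_entry)
--     return content_lines, None
-- ===== Notes on version B (the rewrite author's own statement) =====
-- stated objective: alternative
-- what changed: B inlines find_section_indices and replaces A's three passes over the section (header/terminator scan, insertion-point while loop, duplicate scan) by a single walk that tracks the insertion point, a scanning flag and a duplicate flag as it goes.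
import Mathlib
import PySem

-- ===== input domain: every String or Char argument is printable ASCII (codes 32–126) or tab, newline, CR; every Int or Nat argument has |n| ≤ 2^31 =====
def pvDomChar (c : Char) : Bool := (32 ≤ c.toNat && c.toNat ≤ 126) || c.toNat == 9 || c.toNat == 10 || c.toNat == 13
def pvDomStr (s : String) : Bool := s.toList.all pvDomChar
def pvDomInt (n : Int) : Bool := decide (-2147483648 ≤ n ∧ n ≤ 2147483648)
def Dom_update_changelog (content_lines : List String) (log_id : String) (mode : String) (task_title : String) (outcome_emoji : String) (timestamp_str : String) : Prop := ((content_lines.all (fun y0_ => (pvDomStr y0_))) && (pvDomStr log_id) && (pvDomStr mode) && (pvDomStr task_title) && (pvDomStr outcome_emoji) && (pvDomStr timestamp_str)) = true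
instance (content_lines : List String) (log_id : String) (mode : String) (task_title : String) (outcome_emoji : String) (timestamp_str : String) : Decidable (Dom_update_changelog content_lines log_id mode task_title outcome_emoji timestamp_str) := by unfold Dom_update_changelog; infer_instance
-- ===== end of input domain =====

-- B replaces A's three passes (section scan, insertion-point while loop, duplicate scan) by a
-- single walk that tracks the insertion point and a duplicate flag as it goes (objective:
-- alternative decomposition).  Both the Python A and the Python B mutate content_lines in place
-- via list.insert; the equivalence proved here is about the return value.

-- ===== PORT A =====
def pvCHANGELOG_HEADER : String := "## 7. Changelog"

-- the for-loop of find_section_indices (break = return the pair)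
def pvFindAux (pairs : List (Int × String)) (header_text : String) (start_index end_index : Int) : Int × Int :=
  match pairs with
  | [] => (start_index, end_index)
  | (i, line) :: rest =>
    let stripped_line := PySem.Str.strip line
    if PySem.Str.startswith stripped_line header_text then
      pvFindAux rest header_text i end_index
    else if start_index != -1 && (PySem.Str.startswith stripped_line "## " || PySem.Str.startswith stripped_line "---") then
      (start_index, i)
    else
      pvFindAux rest header_text start_index end_index

def find_section_indices (content_lines : List String) (header_text : String) : Int × Int :=
  pvFindAux (PySem.List.enumerate content_lines 0) header_text (-1) (content_lines.length)

-- while insert_line < end_index and content_lines[insert_line].strip().startswith('-'): insert_line += 1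
def pvInsertLoop (content_lines : List String) (end_index : Int) (insert_line : Int) : Int :=
  if insert_line < end_index then
    match PySem.List.pyGet? content_lines insert_line with
    | some l =>
      if PySem.Str.startswith (PySem.Str.strip l) "-" then
        pvInsertLoop content_lines end_index (insert_line + 1)
      else insert_line
    | none => insert_line  -- unreachable: here 0 ≤ insert_line < end_index ≤ len(content_lines)
  else insert_line
termination_by (end_index - insert_line).toNat
decreasing_by omega

-- for i in range(start_index + 1, end_index): if log_id in content_lines[i]: return warning
def pvDupLoop (content_lines : List String) (log_id : String) (idxs : List Int) : Bool :=
  match idxs with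
  | [] => false
  | i :: rest =>
    match PySem.List.pyGet? content_lines i with
    | some l => if PySem.Str.isIn log_id l then true else pvDupLoop content_lines log_id rest
    | none => false  -- unreachable: the range indices are all in bounds

def update_changelog (content_lines : List String) (log_id : String) (mode : String) (task_title : String) (outcome_emoji : String) (timestamp_str : String) : Option (List String) × Option String :=
  let new_entry := "- **" ++ log_id ++ "** (" ++ timestamp_str ++ "): " ++ mode ++ " - " ++ task_title ++ " " ++ outcome_emoji ++ "\n"
  let se := find_section_indices content_lines pvCHANGELOG_HEADER
  let start_index := se.1
  let end_index := se.2
  if start_index == -1 then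
    (none, some "Error: Changelog header not found.")
  else
    let insert_line := pvInsertLoop content_lines end_index (start_index + 1)
    if pvDupLoop content_lines log_id (PySem.List.pyRange (start_index + 1) end_index 1) then
      (some content_lines, some ("Warning: Changelog entry for ID " ++ log_id ++ " already exists. Skipping insertion."))
    else
      (some (PySem.List.insert content_lines insert_line new_entry), none)

-- ===== PORT B =====
-- single pass: (in_section, insert_at, scanning, duplicate) state; break = return the pair
def pvAltLoop (pairs : List (Int × String)) (log_id : String) (in_section : Bool) (insert_at : Option Int) (scanning duplicate : Bool) : Option Int × Bool :=
  match pairs with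
  | [] => (insert_at, duplicate)
  | (i, line) :: rest =>
    let s := PySem.Str.strip line
    if PySem.Str.startswith s pvCHANGELOG_HEADER then
      pvAltLoop rest log_id true (some (i + 1)) true false
    else if in_section then
      if PySem.Str.startswith s "## " || PySem.Str.startswith s "---" then
        (insert_at, duplicate)
      else
        let insert_at' := if scanning && PySem.Str.startswith s "-" then some (i + 1) else insert_at
        let scanning' := scanning && PySem.Str.startswith s "-"
        let duplicate' := duplicate || PySem.Str.isIn log_id line
        pvAltLoop rest log_id true insert_at' scanning' duplicate'
    else
      pvAltLoop rest log_id in_section insert_at scanning duplicate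

def update_changelog_alt (content_lines : List String) (log_id : String) (mode : String) (task_title : String) (outcome_emoji : String) (timestamp_str : String) : Option (List String) × Option String :=
  let new_entry := "- **" ++ log_id ++ "** (" ++ timestamp_str ++ "): " ++ mode ++ " - " ++ task_title ++ " " ++ outcome_emoji ++ "\n"
  match pvAltLoop (PySem.List.enumerate content_lines 0) log_id false none false false with
  | (none, _) => (none, some "Error: Changelog header not found.")
  | (some k, dup) =>
    if dup then
      (some content_lines, some ("Warning: Changelog entry for ID " ++ log_id ++ " already exists. Skipping insertion."))
    else
      (some (PySem.List.insert content_lines k new_entry), none)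

-- ===== PRECONDITION & SPEC =====
def Spec_update_changelog (content_lines : List String) (log_id : String) (mode : String) (task_title : String) (outcome_emoji : String) (timestamp_str : String) (out : Option (List String) × Option String) : Prop := out = update_changelog_alt content_lines log_id mode task_title outcome_emoji timestamp_str
instance (content_lines : List String) (log_id : String) (mode : String) (task_title : String) (outcome_emoji : String) (timestamp_str : String) (out : Option (List String) × Option String) : Decidable (Spec_update_changelog content_lines log_id mode task_title outcome_emoji timestamp_str out) := by unfold Spec_update_changelog; infer_instance

-- ===== CLAIM (what is proved, stated in full; the proofs are below) =====
def Claim_equal_update_changelog : Prop := ∀ (content_lines : List String) (log_id : String) (mode : String) (task_title : String) (outcome_emoji : String) (timestamp_str : String), Dom_update_changelog content_lines log_id mode task_title outcome_emoji timestamp_str → Spec_update_changelog content_lines log_id mode task_title outcome_emoji timestamp_str (update_changelog content_lines log_id mode task_title outcome_emoji timestamp_str)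

-- ===== LEMMAS AND PROOFS =====

-- abbreviations for the three line classifications
def pvDash (l : String) : Bool := PySem.Str.startswith (PySem.Str.strip l) "-"
def pvTerm (l : String) : Bool := PySem.Str.startswith (PySem.Str.strip l) "## " || PySem.Str.startswith (PySem.Str.strip l) "---"
def pvHdr (l : String) : Bool := PySem.Str.startswith (PySem.Str.strip l) pvCHANGELOG_HEADER

-- all lines with index in [a, b) strip-start with '-'
def pvAllDash (lines : List String) (a b : Nat) : Prop :=
  ∀ k : Nat, a ≤ k → k < b → pvDash (lines.getD k "") = true

-- duplicate flag over the slice [a, b)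
def pvDupSeg (lines : List String) (lid : String) (a b : Nat) : Bool :=
  ((lines.drop a).take (b - a)).any (fun l => PySem.Str.isIn lid l)

theorem pvGet_eq {lines : List String} {i : Nat} (h : i < lines.length) :
    PySem.List.pyGet? lines (i : Int) = some (lines.getD i "") := by
  simp [PySem.List.pyGet?_natCast, List.getElem?_eq_getElem h, List.getD_eq_getElem?_getD]

theorem pvInsertLoop_stop_ge {lines : List String} {e j : Int} (h : e ≤ j) :
    pvInsertLoop lines e j = j := by
  unfold pvInsertLoop
  simp [not_lt.mpr h]

theorem pvInsertLoop_stop_nondash {lines : List String} {e : Int} {j : Nat}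
    (hj : (j : Int) < e) (hlen : j < lines.length) (hnd : pvDash (lines.getD j "") = false) :
    pvInsertLoop lines e (j : Int) = j := by
  unfold pvInsertLoop
  simp only [pvDash] at hnd
  simp at hnd
  simp [hj, pvGet_eq hlen, hnd]

theorem pvDupSeg_cons {lines : List String} {lid : String} {a b : Nat}
    (ha : a < lines.length) (hab : a < b) :
    pvDupSeg lines lid a b = (PySem.Str.isIn lid (lines.getD a "") || pvDupSeg lines lid (a + 1) b) := by
  have hd : lines.drop a = lines.getD a "" :: lines.drop (a + 1) := by
    rw [List.drop_eq_getElem_cons ha, List.getD_eq_getElem?_getD, List.getElem?_eq_getElem ha]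
    rfl
  simp [pvDupSeg, hd, show b - a = (b - (a + 1)) + 1 by omega]

theorem pvInsertLoop_skip {lines : List String} {e : Int} (a b : Nat)
    (hab : a ≤ b) (hbe : (b : Int) ≤ e) (hblen : b ≤ lines.length)
    (hd : pvAllDash lines a b) :
    pvInsertLoop lines e (a : Int) = pvInsertLoop lines e (b : Int) := by
  rcases eq_or_lt_of_le hab with rfl | hlt
  · rfl
  · have ha : a < lines.length := by omega
    have hda : pvDash (lines.getD a "") = true := hd a le_rfl hlt
    have step : pvInsertLoop lines e (a : Int) = pvInsertLoop lines e ((a : Int) + 1) := by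
      have hae : (a : Int) < e := by
        have : (a : Int) < (b : Int) := by exact_mod_cast hlt
        omega
      have hda' := hda
      simp only [pvDash] at hda'
      simp at hda'
      rw [pvInsertLoop]
      simp [hae, pvGet_eq ha, hda']
    rw [step, show (a : Int) + 1 = ((a + 1 : Nat) : Int) by push_cast; ring]
    exact pvInsertLoop_skip (a + 1) b (by omega) hbe hblen
      (fun k hk1 hk2 => hd k (by omega) hk2)
termination_by b - a

theorem pvDupLoop_eq_seg (lines : List String) (lid : String) (a b : Nat)
    (hb : b ≤ lines.length) :
    pvDupLoop lines lid (PySem.List.pyRange (a : Int) (b : Int) 1) = pvDupSeg lines lid a b := by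
  by_cases h : b ≤ a
  · rw [PySem.List.pyRange_one_eq_nil (by exact_mod_cast h)]
    simp [pvDupLoop, pvDupSeg, Nat.sub_eq_zero_of_le h]
  · have h : a < b := by omega
    have ha : a < lines.length := by omega
    rw [PySem.List.pyRange_one_cons (by exact_mod_cast h)]
    rw [pvDupLoop, pvGet_eq ha, pvDupSeg_cons ha h,
      show (a : Int) + 1 = ((a + 1 : Nat) : Int) by push_cast; ring,
      pvDupLoop_eq_seg lines lid (a + 1) b hb]
    cases hin : PySem.Str.isIn lid (lines.getD a "") <;> simp at hin <;> simp [hin]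
termination_by b - a

theorem pvDupSeg_ext {lines : List String} {lid : String} {a i : Nat}
    (ha : a ≤ i) (hi : i < lines.length) :
    pvDupSeg lines lid a (i + 1) = (pvDupSeg lines lid a i || PySem.Str.isIn lid (lines.getD i "")) := by
  simp [pvDupSeg, show i + 1 - a = (i - a) + 1 by omega, List.take_add_one, List.getElem?_drop,
    show a + (i - a) = i by omega, List.getElem?_eq_getElem hi, List.getD_eq_getElem?_getD]

theorem pvFindAux_fst_nonneg (pairs : List (Int × String)) (h : String) (s e : Int)
    (hs : 0 ≤ s) (hp : ∀ p ∈ pairs, 0 ≤ p.1) : 0 ≤ (pvFindAux pairs h s e).1 := by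
  induction pairs generalizing s with
  | nil => exact hs
  | cons p rest ih =>
    obtain ⟨i, line⟩ := p
    have hi : 0 ≤ i := hp (i, line) List.mem_cons_self
    rw [pvFindAux]
    split_ifs <;>
      first
        | exact ih i hi (fun q hq => hp q (List.mem_cons_of_mem _ hq))
        | exact hs
        | exact ih s hs (fun q hq => hp q (List.mem_cons_of_mem _ hq))

-- at the end of the section (break or end of input at index i) the tracked state matches
-- A's insertion-point loop and duplicate scan over [s+1, i)
theorem pvConcl (lid : String) (lines : List String) (i s j : Nat) (scanning duplicate : Bool)
    (hilen : i ≤ lines.length) (hsi : s < i)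
    (hscan : scanning = true → j = i ∧ pvAllDash lines (s + 1) i)
    (hfrozen : scanning = false → s + 1 ≤ j ∧ j < i ∧ pvAllDash lines (s + 1) j ∧ pvDash (lines.getD j "") = false)
    (hdup : duplicate = pvDupSeg lines lid (s + 1) i) :
    ((some (j : Int), duplicate) : Option Int × Bool)
      = (some (pvInsertLoop lines (i : Int) ((s : Int) + 1)),
         pvDupLoop lines lid (PySem.List.pyRange ((s : Int) + 1) (i : Int) 1)) := by
  have hcast : (s : Int) + 1 = ((s + 1 : Nat) : Int) := by push_cast; ring
  have hdupe : pvDupLoop lines lid (PySem.List.pyRange ((s : Int) + 1) (i : Int) 1) = duplicate := by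
    rw [hcast, pvDupLoop_eq_seg lines lid (s + 1) i hilen, hdup]
  have hins : pvInsertLoop lines (i : Int) ((s : Int) + 1) = (j : Int) := by
    cases hsc : scanning with
    | true =>
      obtain ⟨rfl, hall⟩ := hscan hsc
      rw [hcast, pvInsertLoop_skip (s + 1) j (by omega) le_rfl (by omega) hall]
      exact pvInsertLoop_stop_ge le_rfl
    | false =>
      obtain ⟨h1, h2, h3, h4⟩ := hfrozen hsc
      rw [hcast, pvInsertLoop_skip (s + 1) j h1 (by exact_mod_cast Nat.le_of_lt h2) (by omega) h3]
      exact pvInsertLoop_stop_nondash (by exact_mod_cast h2) (by omega) h4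
  rw [hins, hdupe]

-- phase-2 invariant: inside the section with last header at index s
theorem pvPhase2 (lid : String) (lines : List String) :
    ∀ (rest : List String) (i : Nat) (s j : Nat) (scanning duplicate : Bool),
    List.drop i lines = rest → i ≤ lines.length → s < i →
    (scanning = true → j = i ∧ pvAllDash lines (s + 1) i) →
    (scanning = false → s + 1 ≤ j ∧ j < i ∧ pvAllDash lines (s + 1) j ∧ pvDash (lines.getD j "") = false) →
    duplicate = pvDupSeg lines lid (s + 1) i →
    pvAltLoop (PySem.List.enumerate rest (i : Int)) lid true (some (j : Int)) scanning duplicate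
      = ((some (pvInsertLoop lines (pvFindAux (PySem.List.enumerate rest (i : Int)) pvCHANGELOG_HEADER (s : Int) (lines.length : Int)).2
            ((pvFindAux (PySem.List.enumerate rest (i : Int)) pvCHANGELOG_HEADER (s : Int) (lines.length : Int)).1 + 1))),
         pvDupLoop lines lid (PySem.List.pyRange
            ((pvFindAux (PySem.List.enumerate rest (i : Int)) pvCHANGELOG_HEADER (s : Int) (lines.length : Int)).1 + 1)
            (pvFindAux (PySem.List.enumerate rest (i : Int)) pvCHANGELOG_HEADER (s : Int) (lines.length : Int)).2 1)) := by
  intro rest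
  induction rest with
  | nil =>
    intro i s j scanning duplicate hdrop hilen hsi hscan hfrozen hdup
    have hlen : lines.length ≤ i := List.drop_eq_nil_iff.mp hdrop
    have hieq : i = lines.length := le_antisymm hilen hlen
    rw [PySem.List.enumerate_nil, pvAltLoop, pvFindAux]
    rw [← hieq]
    exact pvConcl lid lines i s j scanning duplicate hilen hsi hscan hfrozen hdup
  | cons l rest' ih =>
    intro i s j scanning duplicate hdrop hilen hsi hscan hfrozen hdup
    have hlt : i < lines.length := by
      by_contra hno
      rw [List.drop_eq_nil_iff.mpr (by omega)] at hdrop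
      exact List.cons_ne_nil l rest' hdrop.symm
    have hgetl : lines[i]? = some l := by
      have h0 := congrArg (fun t => t[0]?) hdrop
      simpa using h0
    have hgetD : lines.getD i "" = l := by
      simp [List.getD_eq_getElem?_getD, hgetl]
    have hdrop' : lines.drop (i + 1) = rest' := by
      have h0 := congrArg List.tail hdrop
      simpa [List.tail_drop] using h0
    have hcast : (i : Int) + 1 = ((i + 1 : Nat) : Int) := by push_cast; ring
    rw [PySem.List.enumerate_cons, pvAltLoop, pvFindAux]
    by_cases hh : PySem.Str.startswith (PySem.Str.strip l) pvCHANGELOG_HEADER = true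
    · simp only [hh, if_true, hcast]
      exact ih (i + 1) i (i + 1) true false hdrop' (by omega) (by omega)
        (fun _ => ⟨rfl, fun k hk1 hk2 => absurd hk2 (by omega)⟩)
        (fun hf => nomatch hf)
        (by simp [pvDupSeg])
    · by_cases ht : (PySem.Str.startswith (PySem.Str.strip l) "## " || PySem.Str.startswith (PySem.Str.strip l) "---") = true
      · have hs0 : ((s : Int) != -1) = true := by simp
        simp only [hh, ht, hs0, if_false, if_true, Bool.false_eq_true]
        exact pvConcl lid lines i s j scanning duplicate (by omega) hsi hscan hfrozen hdup
      · simp only [hh, ht, if_false, Bool.false_eq_true, Bool.and_false, if_true]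
        have hdup' : (duplicate || PySem.Str.isIn lid l) = pvDupSeg lines lid (s + 1) (i + 1) := by
          rw [pvDupSeg_ext (by omega) hlt, hgetD, hdup]
        cases hsc : scanning with
        | true =>
          obtain ⟨hji, hall⟩ := hscan hsc
          have hall' : pvDash l = true → pvAllDash lines (s + 1) (i + 1) := by
            intro hd k hk1 hk2
            rcases Nat.lt_or_ge k i with hk | hk
            · exact hall k hk1 hk
            · have hki : k = i := by omega
              rw [hki, hgetD]; exact hd
          cases hd : pvDash l with
          | true =>
            have hd' : PySem.Str.startswith (PySem.Str.strip l) "-" = true := hd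
            simp only [hd', if_true, Bool.and_true, hcast]
            exact ih (i + 1) s (i + 1) true (duplicate || PySem.Str.isIn lid l) hdrop' (by omega) (by omega)
              (fun _ => ⟨rfl, hall' hd⟩) (fun hf => nomatch hf) hdup'
          | false =>
            have hd' : PySem.Str.startswith (PySem.Str.strip l) "-" = false := hd
            simp only [hd', Bool.and_false]
            rw [hji]
            exact ih (i + 1) s i false (duplicate || PySem.Str.isIn lid l) hdrop' (by omega) (by omega)
              (fun hf => nomatch hf)
              (fun _ => ⟨by omega, by omega, hji ▸ hall, by rw [hgetD]; exact hd⟩)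
              hdup'
        | false =>
          obtain ⟨h1, h2, h3, h4⟩ := hfrozen hsc
          simp only [Bool.false_and, Bool.false_eq_true]
          exact ih (i + 1) s j false (duplicate || PySem.Str.isIn lid l) hdrop' (by omega) (by omega)
            (fun hf => nomatch hf)
            (fun _ => ⟨h1, by omega, h3, h4⟩)
            hdup'

-- phase-1: before any header has been seen
theorem pvPhase1 (lid : String) (lines : List String) :
    ∀ (rest : List String) (i : Nat),
    List.drop i lines = rest → i ≤ lines.length →
    pvAltLoop (PySem.List.enumerate rest (i : Int)) lid false none false false
      = (if (pvFindAux (PySem.List.enumerate rest (i : Int)) pvCHANGELOG_HEADER (-1) (lines.length : Int)).1 = -1 then (none, false)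
         else ((some (pvInsertLoop lines (pvFindAux (PySem.List.enumerate rest (i : Int)) pvCHANGELOG_HEADER (-1) (lines.length : Int)).2
                  ((pvFindAux (PySem.List.enumerate rest (i : Int)) pvCHANGELOG_HEADER (-1) (lines.length : Int)).1 + 1))),
               pvDupLoop lines lid (PySem.List.pyRange
                  ((pvFindAux (PySem.List.enumerate rest (i : Int)) pvCHANGELOG_HEADER (-1) (lines.length : Int)).1 + 1)
                  (pvFindAux (PySem.List.enumerate rest (i : Int)) pvCHANGELOG_HEADER (-1) (lines.length : Int)).2 1))) := by
  intro rest
  induction rest with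
  | nil =>
    intro i _ _
    rw [PySem.List.enumerate_nil, pvAltLoop, pvFindAux]
    simp
  | cons l rest' ih =>
    intro i hdrop hilen
    have hlt : i < lines.length := by
      by_contra hno
      rw [List.drop_eq_nil_iff.mpr (by omega)] at hdrop
      exact List.cons_ne_nil l rest' hdrop.symm
    have hdrop' : lines.drop (i + 1) = rest' := by
      have h0 := congrArg List.tail hdrop
      simpa [List.tail_drop] using h0
    have hcast : (i : Int) + 1 = ((i + 1 : Nat) : Int) := by push_cast; ring
    rw [PySem.List.enumerate_cons, pvAltLoop, pvFindAux]
    by_cases hh : PySem.Str.startswith (PySem.Str.strip l) pvCHANGELOG_HEADER = true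
    · simp only [hh, if_true, hcast]
      have hpos : 0 ≤ (pvFindAux (PySem.List.enumerate rest' ((i + 1 : Nat) : Int)) pvCHANGELOG_HEADER (i : Int) (lines.length : Int)).1 := by
        apply pvFindAux_fst_nonneg _ _ _ _ (by exact_mod_cast Int.natCast_nonneg i)
        intro p hp
        obtain ⟨k, hk, rfl⟩ := (PySem.List.mem_enumerate_iff _ _ _).mp hp
        positivity
      rw [if_neg (by omega)]
      exact pvPhase2 lid lines rest' (i + 1) i (i + 1) true false hdrop' (by omega) (by omega)
        (fun _ => ⟨rfl, fun k hk1 hk2 => absurd hk2 (by omega)⟩)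
        (fun hf => nomatch hf)
        (by simp [pvDupSeg])
    · have hneg : ((-1 : Int) != -1) = false := by simp
      simp only [hh, hneg, if_false, Bool.false_and, Bool.false_eq_true, hcast]
      exact ih (i + 1) hdrop' (by omega)

-- ===== VERDICT (by name: the statement is the Claim_ definition above) =====
theorem update_changelog_spec : Claim_equal_update_changelog := by
  intro content_lines log_id mode task_title outcome_emoji timestamp_str _
  unfold Spec_update_changelog update_changelog update_changelog_alt find_section_indices
  have h1 := pvPhase1 log_id content_lines content_lines 0 (by simp) (by simp)
  push_cast at h1
  rw [h1]
  by_cases hse : (pvFindAux (PySem.List.enumerate content_lines 0) pvCHANGELOG_HEADER (-1) (content_lines.length : Int)).1 = -1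
  · simp [hse]
  · simp only [if_neg hse]
    simp [hse]
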